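-- pv_equiv track=rewrite | github.com/VaninaBlas/Guias | guia10/ejercicio2.py | contar_coincidencias
-- ===== SOURCE A (Python) =====
-- def contar_coincidencias(xs:list[int])->int:
--     """
--     Requiere: nada
--     Devuelve: cuantas veces es cierto que la i-eisma posicion tiene el numero i
--     """
--     i=len(xs)-1
--     n=0
--     if(len(xs)==0):
--         return 0
--     else:
--         if(xs[i]==i):
--             n+=1
--             return n+contar_coincidencias(xs[:i])
--         else:
--             return contar_coincidencias(xs[:i])
-- ===== SOURCE B (Python) =====
-- def contar_coincidencias(xs: list[int]) -> int:
--     n = 0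
--     for i, x in enumerate(xs):
--         if x == i:
--             n += 1
--     return n
-- ===== Notes on version B (the rewrite author's own statement) =====
-- stated objective: faster
-- what changed: Replaces A's tail-slicing recursion (which copies a prefix of the list at every step) with a single forward pass over enumerate(xs) maintaining a counter.
import Mathlib
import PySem

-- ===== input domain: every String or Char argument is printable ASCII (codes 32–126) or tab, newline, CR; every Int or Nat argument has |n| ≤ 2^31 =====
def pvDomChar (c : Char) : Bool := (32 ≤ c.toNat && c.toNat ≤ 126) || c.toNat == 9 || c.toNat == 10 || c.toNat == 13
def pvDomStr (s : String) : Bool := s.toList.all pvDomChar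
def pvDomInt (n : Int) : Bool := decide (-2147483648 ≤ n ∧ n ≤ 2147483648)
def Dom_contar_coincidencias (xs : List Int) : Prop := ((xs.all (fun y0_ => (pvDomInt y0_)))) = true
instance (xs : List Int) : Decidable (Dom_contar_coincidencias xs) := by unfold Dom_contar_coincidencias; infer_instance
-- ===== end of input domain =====

-- B replaces A's tail-slicing recursion by a single forward pass with a counter (faster: no prefix copies).

-- ===== PORT A =====
-- A: i = len(xs)-1; if empty return 0; else add 1 if xs[i]==i and recurse on xs[:i].
def contar_coincidencias (xs : List Int) : Int :=
  if xs.length = 0 then 0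
  else
    let i : Int := (xs.length : Int) - 1
    if PySem.List.pyGetD xs i 0 = i then
      1 + contar_coincidencias (PySem.List.slice xs none (some i))
    else
      contar_coincidencias (PySem.List.slice xs none (some i))
termination_by xs.length
decreasing_by
  all_goals
    rename_i h
    have hl : ((xs.length : Int) - 1) = ((xs.length - 1 : Nat) : Int) := by omega
    rw [hl, PySem.List.slice_to_natCast]
    simp [List.length_take]
    omega

-- ===== PORT B =====
-- B: n = 0; for i, x in enumerate(xs): if x == i: n += 1; return n.
def contar_coincidencias_alt (xs : List Int) : Int :=
  (PySem.List.enumerate xs).foldl (fun n p => if p.2 = p.1 then n + 1 else n) 0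

-- ===== PRECONDITION & SPEC =====
def Spec_contar_coincidencias (xs : List Int) (out : Int) : Prop := out = contar_coincidencias_alt xs
instance (xs : List Int) (out : Int) : Decidable (Spec_contar_coincidencias xs out) := by unfold Spec_contar_coincidencias; infer_instance

-- ===== CLAIM (what is proved, stated in full; the proofs are below) =====
def Claim_equal_contar_coincidencias : Prop := ∀ (xs : List Int), Dom_contar_coincidencias xs → Spec_contar_coincidencias xs (contar_coincidencias xs)

-- ===== LEMMAS AND PROOFS =====

theorem foldl_count_shift (l : List (Int × Int)) (c : Int) :
    l.foldl (fun n p => if p.2 = p.1 then n + 1 else n) c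
      = c + l.foldl (fun n p => if p.2 = p.1 then n + 1 else n) 0 := by
  induction l generalizing c with
  | nil => simp
  | cons x t ih =>
    simp only [List.foldl_cons]
    rw [ih, ih (if x.2 = x.1 then 0 + 1 else 0)]
    split_ifs <;> ring

theorem alt_append (ys : List Int) (x : Int) :
    contar_coincidencias_alt (ys ++ [x])
      = contar_coincidencias_alt ys + (if x = (ys.length : Int) then 1 else 0) := by
  unfold contar_coincidencias_alt
  rw [PySem.List.enumerate_append, List.foldl_append]
  simp only [PySem.List.enumerate, List.foldl_cons, List.foldl_nil]
  rw [foldl_count_shift]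
  simp only [zero_add]
  split_ifs <;> simp

theorem A_append (ys : List Int) (x : Int) :
    contar_coincidencias (ys ++ [x])
      = (if x = (ys.length : Int) then 1 else 0) + contar_coincidencias ys := by
  rw [contar_coincidencias]
  have hne : (ys ++ [x]).length ≠ 0 := by simp
  have hlen : (((ys ++ [x]).length : Int) - 1) = ((ys.length : Nat) : Int) := by
    push_cast [List.length_append, List.length_cons, List.length_nil]; omega
  simp only [hne, if_false, hlen]
  rw [PySem.List.slice_to_natCast]
  have hget : PySem.List.pyGetD (ys ++ [x]) ((ys.length : Nat) : Int) 0 = x := by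
    rw [PySem.List.pyGetD_natCast]
    simp [List.getD]
  have htake : (ys ++ [x]).take ys.length = ys := by
    simp
  rw [hget, htake]
  split_ifs <;> simp

theorem A_eq_alt (xs : List Int) : contar_coincidencias xs = contar_coincidencias_alt xs := by
  induction xs using List.reverseRecOn with
  | nil =>
    rw [contar_coincidencias]
    simp [contar_coincidencias_alt, PySem.List.enumerate]
  | append_singleton ys x ih =>
    rw [A_append, alt_append, ih]
    split_ifs <;> ring

-- ===== VERDICT (by name: the statement is the Claim_ definition above) =====
theorem contar_coincidencias_spec : Claim_equal_contar_coincidencias := by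
  intro xs _
  unfold Spec_contar_coincidencias
  exact A_eq_alt xs
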